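-- pv_equiv track=rewrite | github.com/fredfeng/LoopSummary | src/analysis_loop_summary_synthesizer.py | expand_wildcards
-- ===== SOURCE A (Python) =====
-- from itertools import combinations, product
--
-- def expand_wildcards(wildcards, types, lines):
--     new_lines = []
--     if len(wildcards) > 0:
--         poss_types = product(types, repeat=len(wildcards))
--         for types in poss_types:
--             for new_line in lines:
--                 for wildcard,typ in zip(wildcards, list(types)):
--                     new_line = new_line.replace(wildcard, typ)
--                 new_lines.append(new_line)
--     else:
--         for new_line in lines:
--             new_lines.append(new_line)
--
--     return new_lines
-- ===== SOURCE B (Python) =====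
-- def expand_wildcards(wildcards, types, lines):
--     if not wildcards:
--         return list(lines)
--     w, rest = wildcards[0], wildcards[1:]
--     result = []
--     for t in types:
--         result.extend(expand_wildcards(rest, types, [ln.replace(w, t) for ln in lines]))
--     return result
-- ===== Notes on version B (the rewrite author's own statement) =====
-- stated objective: alternative
-- what changed: Replaces the itertools.product-over-tuples triple loop with a recursion over the wildcard list: each step substitutes the first wildcard by every type across all lines and recurses on the remaining wildcards, never materializing type tuples.
import Mathlib
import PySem

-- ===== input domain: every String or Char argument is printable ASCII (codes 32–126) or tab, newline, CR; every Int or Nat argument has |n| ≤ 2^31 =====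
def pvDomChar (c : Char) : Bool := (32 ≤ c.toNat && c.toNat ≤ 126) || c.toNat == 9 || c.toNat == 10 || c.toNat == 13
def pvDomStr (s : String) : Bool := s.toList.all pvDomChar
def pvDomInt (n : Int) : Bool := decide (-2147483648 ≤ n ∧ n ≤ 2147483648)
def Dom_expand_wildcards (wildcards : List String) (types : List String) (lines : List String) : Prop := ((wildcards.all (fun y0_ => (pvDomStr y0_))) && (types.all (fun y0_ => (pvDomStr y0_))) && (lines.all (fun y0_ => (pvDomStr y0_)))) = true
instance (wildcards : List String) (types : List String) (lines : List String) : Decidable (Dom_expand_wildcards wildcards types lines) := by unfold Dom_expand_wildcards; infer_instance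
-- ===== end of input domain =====

-- B expands the wildcards by recursion over the wildcard list (one substitution pass per wildcard)
-- instead of materializing all type tuples via itertools.product; same cost, alternative decomposition.

-- ===== PORT A =====
-- itertools.product(types, repeat=n): first coordinate varies slowest
def pvProdRep (types : List String) : Nat → List (List String)
  | 0 => [[]]
  | n+1 => types.flatMap (fun t => (pvProdRep types n).map (fun tys => t :: tys))

def expand_wildcards (wildcards : List String) (types : List String) (lines : List String) : List String :=
  if wildcards.length > 0 then
    (pvProdRep types wildcards.length).foldl (fun acc tys =>
      lines.foldl (fun acc new_line =>
        acc ++ [(List.zip wildcards tys).foldl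
                  (fun l (p : String × String) => PySem.Str.replace l p.1 p.2) new_line]) acc) []
  else
    lines.foldl (fun acc new_line => acc ++ [new_line]) []

-- ===== PORT B =====
-- one wildcard at a time: replace the first wildcard by each type, recurse on the rest
def expand_wildcards_alt (wildcards : List String) (types : List String) (lines : List String) : List String :=
  match wildcards with
  | [] => lines
  | w :: rest =>
    types.foldl (fun result t =>
      result ++ expand_wildcards_alt rest types (lines.map (fun ln => PySem.Str.replace ln w t))) []

-- ===== PRECONDITION & SPEC =====
def Spec_expand_wildcards (wildcards : List String) (types : List String) (lines : List String) (out : List String) : Prop := out = expand_wildcards_alt wildcards types lines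
instance (wildcards : List String) (types : List String) (lines : List String) (out : List String) : Decidable (Spec_expand_wildcards wildcards types lines out) := by unfold Spec_expand_wildcards; infer_instance

-- ===== CLAIM (what is proved, stated in full; the proofs are below) =====
def Claim_equal_expand_wildcards : Prop := ∀ (wildcards : List String) (types : List String) (lines : List String), Dom_expand_wildcards wildcards types lines → Spec_expand_wildcards wildcards types lines (expand_wildcards wildcards types lines)

-- ===== LEMMAS AND PROOFS =====



-- ===== more lemmas =====
def pvSubst (wildcards tys : List String) (line : String) : String :=
  (List.zip wildcards tys).foldl (fun l (p : String × String) => PySem.Str.replace l p.1 p.2) line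

theorem pvA_flat (wildcards types lines : List String) :
    expand_wildcards wildcards types lines =
      (pvProdRep types wildcards.length).flatMap (fun tys => lines.map (pvSubst wildcards tys)) := by
  unfold expand_wildcards
  cases wildcards with
  | nil =>
    rw [if_neg (by simp), PySem.List.foldl_append_singleton_eq_self]
    show lines = ([[]] : List (List String)).flatMap fun tys => lines.map (pvSubst [] tys)
    simp [show pvSubst [] [] = id from rfl]
  | cons w rest =>
    simp only [List.length_cons, gt_iff_lt, Nat.succ_pos, if_pos]
    rw [show (fun (acc : List String) tys =>
        lines.foldl (fun acc new_line =>
          acc ++ [(List.zip (w :: rest) tys).foldl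
            (fun l (p : String × String) => PySem.Str.replace l p.1 p.2) new_line]) acc)
      = (fun acc tys => acc ++ lines.map (pvSubst (w :: rest) tys)) from ?_]
    · rw [PySem.List.foldl_append_eq_flatMap]; simp
    · funext acc tys
      rw [PySem.List.foldl_append_singleton_eq_map]
      rfl

theorem pvB_flat (wildcards : List String) : ∀ (types lines : List String),
    expand_wildcards_alt wildcards types lines =
      (pvProdRep types wildcards.length).flatMap (fun tys => lines.map (pvSubst wildcards tys)) := by
  induction wildcards with
  | nil =>
    intro types lines
    simp [expand_wildcards_alt, pvProdRep, show pvSubst [] [] = id from rfl]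
  | cons w rest ih =>
    intro types lines
    rw [expand_wildcards_alt, PySem.List.foldl_append_eq_flatMap]
    simp only [List.nil_append, List.length_cons, pvProdRep, List.flatMap_assoc]
    congr 1
    funext t
    rw [ih]
    simp only [List.flatMap_map]
    congr 1
    funext tys
    rw [List.map_map]
    rfl

-- ===== VERDICT =====
theorem expand_wildcards_spec : Claim_equal_expand_wildcards := by
  intro wildcards types lines _
  unfold Spec_expand_wildcards
  rw [pvA_flat, pvB_flat]
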